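-- pv_equiv track=rewrite | github.com/cobeylab/evolution_of_mutability | analyses/mutability/mutability_function.py | count_trinucleotide_CS_coding
-- ===== SOURCE A (Python) =====
-- def count_trinucleotide_CS_coding(seq):
--     n_trinucleotide_CS_coding = 0
--
--     # Coding strand coldspot trinucleotides
--     coding_CS = {"TTC", "CAC", "GGC", "GAC"}
--
--     # For each nucleotide, except the first two:
--     for i in range(2, len(seq)):
--         tri = seq[i-2:i+1]
--         if (tri in coding_CS):
--             n_trinucleotide_CS_coding += 1
--     return n_trinucleotide_CS_coding
-- ===== SOURCE B (Python) =====
-- def count_trinucleotide_CS_coding(seq):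
--     # Tabulate every overlapping trinucleotide once, then query the four coldspot keys.
--     counts = {}
--     for i in range(2, len(seq)):
--         tri = seq[i-2:i+1]
--         counts[tri] = counts.get(tri, 0) + 1
--     return sum(counts.get(t, 0) for t in ("TTC", "CAC", "GGC", "GAC"))
-- ===== Notes on version B (the rewrite author's own statement) =====
-- stated objective: alternative
-- what changed: B tabulates all overlapping trinucleotide windows into a frequency dict in one pass and then sums the tabulated counts for the four coldspot keys, instead of testing each window against the set inside the loop.
import Mathlib
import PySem

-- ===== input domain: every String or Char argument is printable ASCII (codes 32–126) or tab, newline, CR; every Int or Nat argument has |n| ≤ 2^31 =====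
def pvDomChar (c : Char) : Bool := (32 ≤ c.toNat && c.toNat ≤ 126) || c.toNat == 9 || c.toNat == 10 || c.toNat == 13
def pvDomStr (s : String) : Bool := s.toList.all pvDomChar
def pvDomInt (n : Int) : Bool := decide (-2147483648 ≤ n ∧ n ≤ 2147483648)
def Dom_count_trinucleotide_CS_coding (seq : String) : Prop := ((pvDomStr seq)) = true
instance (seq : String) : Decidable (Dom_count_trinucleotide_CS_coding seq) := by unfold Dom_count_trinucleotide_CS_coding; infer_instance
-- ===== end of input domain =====

-- B tabulates every overlapping trinucleotide into a frequency dict, then sums the four coldspot keys (alternative decomposition, same cost).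


-- ===== PORT A =====
def count_trinucleotide_CS_coding (seq : String) : Int :=
  let coding_CS : PySem.Set String := PySem.Set.ofList ["TTC", "CAC", "GGC", "GAC"]
  (PySem.List.pyRange 2 (PySem.Str.len seq) 1).foldl
    (fun acc i =>
      let tri := PySem.Str.slice seq (some (i - 2)) (some (i + 1))
      if tri ∈ coding_CS then acc + 1 else acc)
    0

-- ===== PORT B =====
def count_trinucleotide_CS_coding_alt (seq : String) : Int :=
  let counts : PySem.Dict String Int :=
    (PySem.List.pyRange 2 (PySem.Str.len seq) 1).foldl
      (fun d i =>
        let tri := PySem.Str.slice seq (some (i - 2)) (some (i + 1))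
        d.insert tri (d.getD tri 0 + 1))
      PySem.Dict.empty
  (["TTC", "CAC", "GGC", "GAC"].map (fun t => counts.getD t 0)).sum

-- ===== PRECONDITION & SPEC =====
def Spec_count_trinucleotide_CS_coding (seq : String) (out : Int) : Prop := out = count_trinucleotide_CS_coding_alt seq
instance (seq : String) (out : Int) : Decidable (Spec_count_trinucleotide_CS_coding seq out) := by unfold Spec_count_trinucleotide_CS_coding; infer_instance

-- ===== CLAIM (what is proved, stated in full; the proofs are below) =====
def Claim_equal_count_trinucleotide_CS_coding : Prop := ∀ (seq : String), Dom_count_trinucleotide_CS_coding seq → Spec_count_trinucleotide_CS_coding seq (count_trinucleotide_CS_coding seq)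

-- ===== LEMMAS AND PROOFS =====

-- Counting windows against the four-element set equals the sum of the four individual counts.
theorem countP_mem_four (ws : List String) :
    (ws.foldl (fun acc t => if t ∈ (PySem.Set.ofList ["TTC", "CAC", "GGC", "GAC"] : PySem.Set String) then acc + 1 else acc) (0 : Int))
    = (ws.count "TTC" : Int) + ws.count "CAC" + ws.count "GGC" + ws.count "GAC" := by
  simp only [show (fun (acc : Int) t => if t ∈ (PySem.Set.ofList ["TTC", "CAC", "GGC", "GAC"] : PySem.Set String) then acc + 1 else acc)
      = (fun acc t => if (decide (t ∈ (PySem.Set.ofList ["TTC", "CAC", "GGC", "GAC"] : PySem.Set String)) : Bool) then acc + 1 else acc) from by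
    funext acc t; simp]
  rw [PySem.List.foldl_count_if]
  induction ws with
  | nil => simp
  | cons t ws ih =>
    simp only [List.countP_cons, List.count_cons, PySem.Set.mem_ofList, List.mem_cons,
      List.not_mem_nil, or_false]
    by_cases h1 : t = "TTC" <;> by_cases h2 : t = "CAC" <;> by_cases h3 : t = "GGC" <;> by_cases h4 : t = "GAC" <;>
      simp_all <;> ring

theorem ports_agree (seq : String) : count_trinucleotide_CS_coding seq = count_trinucleotide_CS_coding_alt seq := by
  simp only [count_trinucleotide_CS_coding, count_trinucleotide_CS_coding_alt]
  rw [show (PySem.List.pyRange 2 (PySem.Str.len seq) 1).foldl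
      (fun (d : PySem.Dict String Int) i => d.insert (PySem.Str.slice seq (some (i - 2)) (some (i + 1)))
        (d.getD (PySem.Str.slice seq (some (i - 2)) (some (i + 1))) 0 + 1)) PySem.Dict.empty
    = ((PySem.List.pyRange 2 (PySem.Str.len seq) 1).map (fun i => PySem.Str.slice seq (some (i - 2)) (some (i + 1)))).foldl
        (fun d x => d.insert x (d.getD x 0 + 1)) PySem.Dict.empty from
    (List.foldl_map (f := fun i => PySem.Str.slice seq (some (i - 2)) (some (i + 1)))
      (g := fun (d : PySem.Dict String Int) x => d.insert x (d.getD x 0 + 1))).symm]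
  rw [show (PySem.List.pyRange 2 (PySem.Str.len seq) 1).foldl
      (fun (acc : Int) i => if PySem.Str.slice seq (some (i - 2)) (some (i + 1)) ∈ (PySem.Set.ofList ["TTC", "CAC", "GGC", "GAC"] : PySem.Set String) then acc + 1 else acc) 0
    = ((PySem.List.pyRange 2 (PySem.Str.len seq) 1).map (fun i => PySem.Str.slice seq (some (i - 2)) (some (i + 1)))).foldl
        (fun acc t => if t ∈ (PySem.Set.ofList ["TTC", "CAC", "GGC", "GAC"] : PySem.Set String) then acc + 1 else acc) 0 from
    (List.foldl_map (f := fun i => PySem.Str.slice seq (some (i - 2)) (some (i + 1)))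
      (g := fun (acc : Int) t => if t ∈ (PySem.Set.ofList ["TTC", "CAC", "GGC", "GAC"] : PySem.Set String) then acc + 1 else acc)).symm]
  rw [PySem.Dict.foldl_insert_getD_add_one_eq_counter]
  simp only [List.map_cons, List.map_nil, List.sum_cons, List.sum_nil, PySem.Dict.getD_counter]
  generalize ((PySem.List.pyRange 2 (PySem.Str.len seq) 1).map (fun i => PySem.Str.slice seq (some (i - 2)) (some (i + 1)))) = ws
  rw [countP_mem_four ws]; ring

-- ===== VERDICT (by name: the statement is the Claim_ definition above) =====
theorem count_trinucleotide_CS_coding_spec : Claim_equal_count_trinucleotide_CS_coding := by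
  intro seq _
  exact ports_agree seq
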